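-- pv_equiv track=rewrite | github.com/anagvillanueva/Compiladores | genera Codigo.py | obtenerListaInfija
-- ===== SOURCE A (Python) =====
-- def obtenerListaInfija(cadena_infija):
--     if(type(cadena_infija) == list):
--         return obtenerListaInfija("".join(cadena_infija))
--     '''Devuelve una cadena en notación infija dividida por sus elementos.'''
--     infija = []
--     cad = ''
--     for i in cadena_infija:
--        if i in['+', '-', '*', '/', '(', ')', '^', '=']:
--            if cad != '':
--                infija.append(cad)
--                cad = ''
--            infija.append(i)
--        elif i == chr(32): # Si es un espacio.
--            cad = cad
--        else:
--            cad += i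
--     if cad != '':
--        infija.append(cad)
--     return infija
-- ===== SOURCE B (Python) =====
-- from itertools import groupby
--
-- _OPS = set('+-*/()^=')
--
-- def obtenerListaInfija(cadena_infija):
--     if type(cadena_infija) == list:
--         return obtenerListaInfija("".join(cadena_infija))
--     s = cadena_infija.replace(' ', '')
--     out = []
--     for is_op, grp in groupby(s, key=lambda c: c in _OPS):
--         if is_op:
--             out.extend(grp)          # each operator char is its own token
--         else:
--             out.append(''.join(grp)) # maximal run of operand chars is one token
--     return out
-- ===== Notes on version B (the rewrite author's own statement) =====
-- stated objective: idiomatic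
-- what changed: Replaces A's accumulate-and-flush character state machine by dropping spaces first and grouping the remaining characters with itertools.groupby into operator singletons and maximal operand runs.
import Mathlib
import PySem

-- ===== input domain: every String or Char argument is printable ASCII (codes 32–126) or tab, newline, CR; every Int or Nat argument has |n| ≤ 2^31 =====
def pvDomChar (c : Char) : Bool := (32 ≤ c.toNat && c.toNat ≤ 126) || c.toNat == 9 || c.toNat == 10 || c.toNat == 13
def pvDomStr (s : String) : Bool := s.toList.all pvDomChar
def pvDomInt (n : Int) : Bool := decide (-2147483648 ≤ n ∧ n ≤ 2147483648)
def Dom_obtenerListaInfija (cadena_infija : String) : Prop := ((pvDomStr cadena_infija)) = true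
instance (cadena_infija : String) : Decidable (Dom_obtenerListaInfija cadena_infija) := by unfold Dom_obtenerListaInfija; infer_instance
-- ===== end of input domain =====

-- B drops spaces first and groups the remaining characters into operator singletons and
-- maximal operand runs (itertools.groupby style) instead of A's accumulate-and-flush state
-- machine; objective: more idiomatic, same cost.

-- operator-character test, Python's `i in ['+','-','*','/','(',')','^','=']` / `c in _OPS`
def pvIsOp (c : Char) : Bool := ['+', '-', '*', '/', '(', ')', '^', '='].contains c

-- ===== PORT A =====
-- the loop of A: state = (infija, cad); cad kept as List Char, `cad += i` is `cad ++ [i]`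
def pvALoop : List Char → List String → List Char → List String
  | [], infija, cad => if cad ≠ [] then infija ++ [String.ofList cad] else infija
  | c :: cs, infija, cad =>
      if pvIsOp c then
        pvALoop cs ((if cad ≠ [] then infija ++ [String.ofList cad] else infija) ++ [String.ofList [c]]) []
      else if c = ' ' then
        pvALoop cs infija cad
      else
        pvALoop cs infija (cad ++ [c])

def obtenerListaInfija (cadena_infija : String) : List String :=
  pvALoop cadena_infija.toList [] []

-- ===== PORT B =====
-- groupby over the space-free string: an operator char is its own token (extend),
-- a maximal run of operand chars is joined into one token (append ''.join(grp))
def pvGroups : List Char → List String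
  | [] => []
  | c :: cs =>
      if pvIsOp c then
        String.ofList [c] :: pvGroups cs
      else
        String.ofList (c :: cs.takeWhile (fun d => !pvIsOp d)) ::
          pvGroups (cs.dropWhile (fun d => !pvIsOp d))
termination_by l => l.length
decreasing_by
  all_goals simp only [List.length_cons]
  · omega
  · exact Nat.lt_succ_of_le (List.length_dropWhile_le _ _)

def obtenerListaInfija_alt (cadena_infija : String) : List String :=
  pvGroups (cadena_infija.toList.filter (fun c => c != ' '))

-- ===== PRECONDITION & SPEC =====
def Spec_obtenerListaInfija (cadena_infija : String) (out : List String) : Prop := out = obtenerListaInfija_alt cadena_infija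
instance (cadena_infija : String) (out : List String) : Decidable (Spec_obtenerListaInfija cadena_infija out) := by unfold Spec_obtenerListaInfija; infer_instance

-- ===== CLAIM (what is proved, stated in full; the proofs are below) =====
def Claim_equal_obtenerListaInfija : Prop := ∀ (cadena_infija : String), Dom_obtenerListaInfija cadena_infija → Spec_obtenerListaInfija cadena_infija (obtenerListaInfija cadena_infija)

-- ===== LEMMAS AND PROOFS =====

theorem pvGroups_nil : pvGroups [] = [] := by rw [pvGroups]

theorem pvGroups_cons (c : Char) (cs : List Char) :
    pvGroups (c :: cs) =
      if pvIsOp c then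
        String.ofList [c] :: pvGroups cs
      else
        String.ofList (c :: cs.takeWhile (fun d => !pvIsOp d)) ::
          pvGroups (cs.dropWhile (fun d => !pvIsOp d)) := by
  rw [pvGroups]

theorem pvALoop_append (cs : List Char) : ∀ (infija : List String) (cad : List Char),
    pvALoop cs infija cad = infija ++ pvALoop cs [] cad := by
  induction cs with
  | nil => intro infija cad; by_cases h : cad = [] <;> simp [pvALoop, h]
  | cons c cs ih =>
      intro infija cad
      simp only [pvALoop]
      by_cases hop : pvIsOp c
      · rw [if_pos hop, if_pos hop]
        by_cases h : cad = []
        · rw [if_neg (by simp [h]), if_neg (by simp [h])]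
          rw [ih (infija ++ [String.ofList [c]]) [], ih ([] ++ [String.ofList [c]]) []]
          simp
        · rw [if_pos h, if_pos h]
          rw [ih ((infija ++ [String.ofList cad]) ++ [String.ofList [c]]) [],
            ih (([] ++ [String.ofList cad]) ++ [String.ofList [c]]) []]
          simp
      · rw [if_neg hop, if_neg hop]
        by_cases hsp : c = ' '
        · rw [if_pos hsp, if_pos hsp]; exact ih _ _
        · rw [if_neg hsp, if_neg hsp]; exact ih _ _

theorem pvTakeWhile_all {l : List Char} (h : ∀ c ∈ l, ¬pvIsOp c = true) :
    l.takeWhile (fun d => !pvIsOp d) = l := by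
  induction l with
  | nil => rfl
  | cons c cs ih =>
      have hc := h c (by simp)
      simp [hc, ih (fun d hd => h d (by simp [hd]))]

theorem pvDropWhile_all {l : List Char} (h : ∀ c ∈ l, ¬pvIsOp c = true) :
    l.dropWhile (fun d => !pvIsOp d) = [] := by
  induction l with
  | nil => rfl
  | cons c cs ih =>
      have hc := h c (by simp)
      simp [hc, ih (fun d hd => h d (by simp [hd]))]

theorem pvTakeWhile_stop {l : List Char} (h : ∀ x ∈ l, ¬pvIsOp x = true)
    {c : Char} (hc : pvIsOp c = true) (s : List Char) :
    (l ++ c :: s).takeWhile (fun d => !pvIsOp d) = l := by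
  induction l with
  | nil => simp [hc]
  | cons e es ih =>
      have he := h e (by simp)
      simp [he, ih (fun x hx => h x (by simp [hx]))]

theorem pvDropWhile_stop {l : List Char} (h : ∀ x ∈ l, ¬pvIsOp x = true)
    {c : Char} (hc : pvIsOp c = true) (s : List Char) :
    (l ++ c :: s).dropWhile (fun d => !pvIsOp d) = c :: s := by
  induction l with
  | nil => simp [hc]
  | cons e es ih =>
      have he := h e (by simp)
      simp [he, ih (fun x hx => h x (by simp [hx]))]

-- pvGroups of an all-operand nonempty run is one token
theorem pvGroups_run {l : List Char} (hne : l ≠ []) (h : ∀ c ∈ l, ¬pvIsOp c = true) :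
    pvGroups l = [String.ofList l] := by
  cases l with
  | nil => exact absurd rfl hne
  | cons c cs =>
      have hc := h c (by simp)
      have hcs : ∀ d ∈ cs, ¬pvIsOp d = true := fun d hd => h d (by simp [hd])
      rw [pvGroups_cons, if_neg hc, pvTakeWhile_all hcs, pvDropWhile_all hcs, pvGroups_nil]

-- splitting off a pending all-operand prefix before an operator
theorem pvGroups_pending {cad : List Char} (hne : cad ≠ []) (h : ∀ c ∈ cad, ¬pvIsOp c = true)
    {c : Char} (hop : pvIsOp c = true) (s : List Char) :
    pvGroups (cad ++ c :: s) = String.ofList cad :: pvGroups (c :: s) := by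
  cases cad with
  | nil => exact absurd rfl hne
  | cons d ds =>
      have hd := h d (by simp)
      have hds : ∀ x ∈ ds, ¬pvIsOp x = true := fun x hx => h x (by simp [hx])
      rw [List.cons_append, pvGroups_cons, if_neg hd,
        pvTakeWhile_stop hds hop s, pvDropWhile_stop hds hop s]

-- main invariant: A's loop from pending cad equals B's grouping of cad ++ filtered rest
theorem pvMain (cs : List Char) : ∀ (cad : List Char), (∀ c ∈ cad, ¬pvIsOp c = true) →
    pvALoop cs [] cad = pvGroups (cad ++ cs.filter (fun c => c != ' ')) := by
  induction cs with
  | nil =>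
      intro cad hcad
      by_cases h : cad = []
      · simp [pvALoop, h, pvGroups_nil]
      · simp [pvALoop, h, pvGroups_run h hcad]
  | cons c cs ih =>
      intro cad hcad
      simp only [pvALoop]
      by_cases hop : pvIsOp c
      · have hc' : c ≠ ' ' := by
          intro he; subst he; exact absurd hop (by decide)
        rw [if_pos hop, List.filter_cons_of_pos (by simp [hc'])]
        by_cases h : cad = []
        · rw [if_neg (by simp [h]), pvALoop_append, ih [] (by simp), h]
          simp only [List.nil_append]
          rw [pvGroups_cons, if_pos hop]
          simp
        · rw [if_pos h, pvALoop_append, ih [] (by simp),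
            pvGroups_pending h hcad hop, pvGroups_cons, if_pos hop]
          simp
      · rw [if_neg hop]
        by_cases hsp : c = ' '
        · rw [if_pos hsp, List.filter_cons_of_neg (by simp [hsp]), ih cad hcad]
        · have hall : ∀ x ∈ cad ++ [c], ¬pvIsOp x = true := by
            intro x hx; rcases List.mem_append.1 hx with h1 | h1
            · exact hcad x h1
            · simp at h1; subst h1; exact hop
          rw [if_neg hsp, ih (cad ++ [c]) hall, List.filter_cons_of_pos (by simp [hsp])]
          simp

-- ===== VERDICT (by name: the statement is the Claim_ definition above) =====
theorem obtenerListaInfija_spec : Claim_equal_obtenerListaInfija := by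
  intro s _
  show obtenerListaInfija s = obtenerListaInfija_alt s
  unfold obtenerListaInfija obtenerListaInfija_alt
  simpa using pvMain s.toList [] (by simp)
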